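-- pv_equiv track=rewrite | github.com/Vohihoin/UTSA_Internship | VaheMuJoCoProject/UtilityClasses/helloUtility.py | ringOfLightsXMLString
-- ===== SOURCE A (Python) =====
-- def ringOfLightsXMLString(starter, radius, height):
--     totalString = ""
--     lightcounter = starter
--
--     # center light
--     lightLine = """ <light name = "overhead{lightnum}" pos = "0 0 {height}" dir = "0 0 -1" active = "true" />\n""".format(lightnum = lightcounter, height = height)
--     totalString+= lightLine
--
--
--     for i in range(radius):
--
--         i = i + 1 #(0, 1, 2, ...) -> (1, 2, 3, ...)
--
--         lightcounter += 1
--         lightLine = """ <light name = "overhead{lightnum}" pos = "0 {r} {height}" dir = "0 0 -1" active = "true" />\n""".format(r = i, lightnum = lightcounter, height = height)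
--         totalString+= lightLine
--
--         lightcounter += 1
--         lightLine = """ <light name = "overhead{lightnum}" pos = "{r} 0 {height}" dir = "0 0 -1" active = "true" />\n""".format(r = i, lightnum = lightcounter, height = height)
--         totalString+= lightLine
--
--         lightcounter += 1
--         lightLine = """ <light name = "overhead{lightnum}" pos = "0 -{r} {height}" dir = "0 0 -1" active = "true" />\n""".format(r = i, lightnum = lightcounter, height = height)
--         totalString+= lightLine
--
--         lightcounter += 1
--         lightLine = """ <light name = "overhead{lightnum}" pos = "-{r} 0 {height}" dir = "0 0 -1" active = "true" />\n""".format(r = i, lightnum = lightcounter, height = height)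
--         totalString+= lightLine
--
--     # produces 4r + 1 lights for the xml string
--     return(totalString)
-- ===== SOURCE B (Python) =====
-- def ringOfLightsXMLString(starter, radius, height):
--     def pos(k):
--         # light k of the flat sequence: k == 0 is the center, otherwise
--         # ring q+1, direction d where (q, d) = divmod(k - 1, 4)
--         if k == 0:
--             return 0, 0
--         q, d = divmod(k - 1, 4)
--         r = q + 1
--         x = r if d == 1 else -r if d == 3 else 0
--         y = r if d == 0 else -r if d == 2 else 0
--         return x, y
--
--     parts = []
--     for k in range(4 * max(radius, 0) + 1):
--         x, y = pos(k)
--         parts.append(' <light name = "overhead{0}" pos = "{1} {2} {3}" dir = "0 0 -1" active = "true" />\n'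
--                      .format(starter + k, x, y, height))
--     return ''.join(parts)
-- ===== Notes on version B (the rewrite author's own statement) =====
-- stated objective: alternative
-- what changed: A threads a growing string and a running light counter through a nested ring loop with four hand-unrolled format statements; B enumerates the 4*radius+1 lights as one flat index range and recovers each light's ring and direction by index arithmetic divmod(k-1,4) inside a pos(k) helper, joining the formatted lines at the end.
import Mathlib
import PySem

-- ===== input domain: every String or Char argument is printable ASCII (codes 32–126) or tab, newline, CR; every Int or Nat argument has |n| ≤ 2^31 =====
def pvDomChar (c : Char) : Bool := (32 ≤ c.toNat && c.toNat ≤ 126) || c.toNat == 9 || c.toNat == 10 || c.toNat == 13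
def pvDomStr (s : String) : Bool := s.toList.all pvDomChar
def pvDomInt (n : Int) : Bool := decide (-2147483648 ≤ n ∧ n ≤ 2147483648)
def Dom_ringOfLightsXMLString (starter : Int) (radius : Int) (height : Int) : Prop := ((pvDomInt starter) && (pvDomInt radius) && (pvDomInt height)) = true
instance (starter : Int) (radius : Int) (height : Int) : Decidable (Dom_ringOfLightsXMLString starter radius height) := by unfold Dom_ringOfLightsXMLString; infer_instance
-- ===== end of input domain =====

-- B replaces A's nested ring loop with running string/counter state by one flat pass over the
-- 4*radius+1 light indices, recovering ring and direction from divmod(k-1,4) (objective: alternative; same cost).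


-- ===== PORT A =====
-- A's light-line template; the "{…} {height}" position part varies per line and is passed pre-formatted,
-- exactly as each of A's five .format calls writes it.
def pvLineA (lightnum : Int) (posPrefix : List Char) (height : Int) : List Char :=
  " <light name = \"overhead".toList ++ PySem.Int.toChars lightnum ++
  "\" pos = \"".toList ++ posPrefix ++ [' '] ++ PySem.Int.toChars height ++
  "\" dir = \"0 0 -1\" active = \"true\" />\n".toList

-- the body of A's for-loop: state is (totalString, lightcounter), four unrolled increments/appends
def pvStepA (height : Int) (st : List Char × Int) (i : Int) : List Char × Int :=
  let i := i + 1
  let lc1 := st.2 + 1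
  let ts1 := st.1 ++ pvLineA lc1 ("0 ".toList ++ PySem.Int.toChars i) height
  let lc2 := lc1 + 1
  let ts2 := ts1 ++ pvLineA lc2 (PySem.Int.toChars i ++ " 0".toList) height
  let lc3 := lc2 + 1
  let ts3 := ts2 ++ pvLineA lc3 ("0 -".toList ++ PySem.Int.toChars i) height
  let lc4 := lc3 + 1
  let ts4 := ts3 ++ pvLineA lc4 ("-".toList ++ PySem.Int.toChars i ++ " 0".toList) height
  (ts4, lc4)

def ringOfLightsXMLString (starter : Int) (radius : Int) (height : Int) : String :=
  let totalString := pvLineA starter "0 0".toList height     -- center light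
  let fin := (PySem.List.pyRange 0 radius).foldl (pvStepA height) (totalString, starter)
  String.ofList fin.1

-- ===== PORT B =====
-- B's pos(k): the center at k = 0, otherwise (q, d) = divmod(k - 1, 4), ring radius q + 1
def pvPosB (k : Int) : Int × Int :=
  if k = 0 then (0, 0)
  else
    let q := PySem.Int.floordiv (k - 1) 4
    let d := PySem.Int.mod (k - 1) 4
    let r := q + 1
    (if d = 1 then r else if d = 3 then -r else 0,
     if d = 0 then r else if d = 2 then -r else 0)

-- one formatted line of B (its single .format call; both coordinates formatted integers)
def pvLightB (num : Int) (x : Int) (y : Int) (height : Int) : List Char :=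
  " <light name = \"overhead".toList ++ PySem.Int.toChars num ++
  "\" pos = \"".toList ++ PySem.Int.toChars x ++ [' '] ++ PySem.Int.toChars y ++ [' '] ++
  PySem.Int.toChars height ++ "\" dir = \"0 0 -1\" active = \"true\" />\n".toList

def ringOfLightsXMLString_alt (starter : Int) (radius : Int) (height : Int) : String :=
  let parts := (PySem.List.pyRange 0 (4 * max radius 0 + 1)).foldl
    (fun acc k => acc ++ pvLightB (starter + k) (pvPosB k).1 (pvPosB k).2 height) []
  String.ofList parts

-- ===== PRECONDITION & SPEC =====
def Spec_ringOfLightsXMLString (starter : Int) (radius : Int) (height : Int) (out : String) : Prop := out = ringOfLightsXMLString_alt starter radius height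
instance (starter : Int) (radius : Int) (height : Int) (out : String) : Decidable (Spec_ringOfLightsXMLString starter radius height out) := by unfold Spec_ringOfLightsXMLString; infer_instance

-- ===== CLAIM (what is proved, stated in full; the proofs are below) =====
def Claim_equal_ringOfLightsXMLString : Prop := ∀ (starter : Int) (radius : Int) (height : Int), Dom_ringOfLightsXMLString starter radius height → Spec_ringOfLightsXMLString starter radius height (ringOfLightsXMLString starter radius height)

-- ===== LEMMAS AND PROOFS =====

theorem pvToChars_zero : PySem.Int.toChars 0 = ['0'] := by decide

-- str(-n) = '-' + str(n) for n > 0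
theorem pvToChars_neg (n : Int) (h : 0 < n) :
    PySem.Int.toChars (-n) = '-' :: PySem.Int.toChars n := by
  simp [PySem.Int.toChars, h, not_lt.mpr h.le]
  congr 1
  omega

theorem pvPosB_zero : pvPosB 0 = (0, 0) := by decide

-- divmod(k-1, 4) for k = 4m + j, j = 1..4: quotient m, remainder j-1
theorem pvDivmod (m j : Int) (hj : 0 ≤ j ∧ j < 4) :
    PySem.Int.floordiv (4 * m + j) 4 = m ∧ PySem.Int.mod (4 * m + j) 4 = j := by
  have hq : PySem.Int.floordiv (4 * m + j) 4 = m :=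
    (PySem.Int.floordiv_eq_iff_of_pos (by norm_num)).mpr ⟨by omega, by omega⟩
  have := PySem.Int.floordiv_mul_add_mod (4 * m + j) 4
  rw [hq] at this
  exact ⟨hq, by omega⟩

theorem pvPos1 (m : Int) (hm : 0 ≤ m) : pvPosB (4 * m + 1) = (0, m + 1) := by
  have h0 : (4 * m + 1 : Int) ≠ 0 := by omega
  have hd := pvDivmod m 0 (by omega)
  simp only [pvPosB, h0, if_false, show 4 * m + 1 - 1 = 4 * m + 0 by ring, hd.1, hd.2]
  norm_num

theorem pvPos2 (m : Int) (hm : 0 ≤ m) : pvPosB (4 * m + 2) = (m + 1, 0) := by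
  have h0 : (4 * m + 2 : Int) ≠ 0 := by omega
  have hd := pvDivmod m 1 (by omega)
  simp only [pvPosB, h0, if_false, show 4 * m + 2 - 1 = 4 * m + 1 by ring, hd.1, hd.2]
  norm_num

theorem pvPos3 (m : Int) (hm : 0 ≤ m) : pvPosB (4 * m + 3) = (0, -(m + 1)) := by
  have h0 : (4 * m + 3 : Int) ≠ 0 := by omega
  have hd := pvDivmod m 2 (by omega)
  simp only [pvPosB, h0, if_false, show 4 * m + 3 - 1 = 4 * m + 2 by ring, hd.1, hd.2]
  norm_num

theorem pvPos4 (m : Int) (hm : 0 ≤ m) : pvPosB (4 * m + 4) = (-(m + 1), 0) := by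
  have h0 : (4 * m + 4 : Int) ≠ 0 := by omega
  have hd := pvDivmod m 3 (by omega)
  simp only [pvPosB, h0, if_false, show 4 * m + 4 - 1 = 4 * m + 3 by ring, hd.1, hd.2]
  norm_num

theorem pvCenter_eq (s h : Int) : pvLightB s 0 0 h = pvLineA s "0 0".toList h := by
  simp [pvLightB, pvLineA, pvToChars_zero]

-- a range of four consecutive integers, written out
theorem pvFour (a : Int) : PySem.List.pyRange a (a + 4) = [a, a + 1, a + 2, a + 3] := by
  rw [PySem.List.pyRange_one_cons (by omega), PySem.List.pyRange_one_cons (by omega),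
      PySem.List.pyRange_one_cons (by omega), PySem.List.pyRange_one_cons (by omega),
      PySem.List.pyRange_one_eq_nil (by omega)]
  norm_num
  omega

-- B's four lines for flat indices 4m+1..4m+4 are A's four lines of ring m+1
theorem pvLine1 (s h m : Int) (hm : 0 ≤ m) :
    pvLightB (s + (4 * m + 1)) (pvPosB (4 * m + 1)).1 (pvPosB (4 * m + 1)).2 h
      = pvLineA (s + 4 * m + 1) ("0 ".toList ++ PySem.Int.toChars (m + 1)) h := by
  rw [pvPos1 m hm, show s + (4 * m + 1) = s + 4 * m + 1 by ring]
  simp [pvLightB, pvLineA, pvToChars_zero]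

theorem pvLine2 (s h m : Int) (hm : 0 ≤ m) :
    pvLightB (s + (4 * m + 2)) (pvPosB (4 * m + 2)).1 (pvPosB (4 * m + 2)).2 h
      = pvLineA (s + 4 * m + 2) (PySem.Int.toChars (m + 1) ++ " 0".toList) h := by
  rw [pvPos2 m hm, show s + (4 * m + 2) = s + 4 * m + 2 by ring]
  simp [pvLightB, pvLineA, pvToChars_zero]

theorem pvLine3 (s h m : Int) (hm : 0 ≤ m) :
    pvLightB (s + (4 * m + 3)) (pvPosB (4 * m + 3)).1 (pvPosB (4 * m + 3)).2 h
      = pvLineA (s + 4 * m + 3) ("0 -".toList ++ PySem.Int.toChars (m + 1)) h := by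
  rw [pvPos3 m hm, show s + (4 * m + 3) = s + 4 * m + 3 by ring]
  have hneg : PySem.Int.toChars (-1 + -m) = '-' :: PySem.Int.toChars (m + 1) := by
    rw [show (-1 + -m : Int) = -(m + 1) by ring]; exact pvToChars_neg _ (by omega)
  simp [pvLightB, pvLineA, pvToChars_zero, hneg]

theorem pvLine4 (s h m : Int) (hm : 0 ≤ m) :
    pvLightB (s + (4 * m + 4)) (pvPosB (4 * m + 4)).1 (pvPosB (4 * m + 4)).2 h
      = pvLineA (s + 4 * m + 4) ("-".toList ++ PySem.Int.toChars (m + 1) ++ " 0".toList) h := by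
  rw [pvPos4 m hm, show s + (4 * m + 4) = s + 4 * m + 4 by ring]
  have hneg : PySem.Int.toChars (-1 + -m) = '-' :: PySem.Int.toChars (m + 1) := by
    rw [show (-1 + -m : Int) = -(m + 1) by ring]; exact pvToChars_neg _ (by omega)
  simp [pvLightB, pvLineA, pvToChars_zero, hneg]

-- the common induction: after m rings, A's state is (B's fold over the first 4m+1 flat indices, s + 4m)
theorem pvMain (s h : Int) (m : Nat) :
    ((List.map (fun k => ((k : Nat) : Int)) (List.range m)).foldl (pvStepA h)
        (pvLineA s "0 0".toList h, s))
      = ((PySem.List.pyRange 0 (4 * (m : Int) + 1)).foldl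
          (fun acc k => acc ++ pvLightB (s + k) (pvPosB k).1 (pvPosB k).2 h) [],
         s + 4 * m) := by
  induction m with
  | zero =>
    rw [show (4 * ((0 : Nat) : Int) + 1) = 0 + 1 by norm_num,
        PySem.List.pyRange_one_cons (by omega), PySem.List.pyRange_one_eq_nil (by omega)]
    simp [pvPosB_zero, pvCenter_eq s h]
  | succ m ih =>
    rw [List.range_succ]
    simp only [List.map_append, List.foldl_append, List.map_cons, List.map_nil,
      List.foldl_cons, List.foldl_nil, ih]
    have hm : (0 : Int) ≤ (m : Int) := by omega
    rw [show (4 * ((m + 1 : Nat) : Int) + 1) = (4 * (m : Int) + 1) + 4 by push_cast; ring,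
        PySem.List.pyRange_one_append 0 (4 * (m : Int) + 1) ((4 * (m : Int) + 1) + 4) (by omega) (by omega),
        pvFour, List.foldl_append]
    simp only [List.foldl_cons, List.foldl_nil]
    rw [show (4 * (m : Int) + 1) + 1 = 4 * (m : Int) + 2 by ring,
        show (4 * (m : Int) + 1) + 2 = 4 * (m : Int) + 3 by ring,
        show (4 * (m : Int) + 1) + 3 = 4 * (m : Int) + 4 by ring,
        pvLine1 s h m hm, pvLine2 s h m hm, pvLine3 s h m hm, pvLine4 s h m hm,
        pvStepA]
    simp only [Prod.mk.injEq]
    refine ⟨?_, by push_cast; ring⟩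
    rw [show s + 4 * (m : Int) + 1 + 1 = s + 4 * (m : Int) + 2 by ring,
        show s + 4 * (m : Int) + 2 + 1 = s + 4 * (m : Int) + 3 by ring,
        show s + 4 * (m : Int) + 3 + 1 = s + 4 * (m : Int) + 4 by ring]

-- A's iteration range, converted to List.range
theorem pvRangeA (r : Int) (hr : 0 ≤ r) :
    PySem.List.pyRange 0 r = List.map (fun k => ((k : Nat) : Int)) (List.range r.toNat) := by
  have := PySem.List.pyRange_zero_natCast r.toNat
  rw [Int.toNat_of_nonneg hr] at this
  simpa using this

-- ===== VERDICT (by name: the statement is the Claim_ definition above) =====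
theorem ringOfLightsXMLString_spec : Claim_equal_ringOfLightsXMLString := by
  intro s r h _
  show _ = _
  unfold ringOfLightsXMLString ringOfLightsXMLString_alt
  by_cases hr : r < 0
  · rw [PySem.List.pyRange_one_eq_nil (by omega : r ≤ 0),
        show max r 0 = 0 by omega]
    rw [show (4 * (0 : Int) + 1) = 0 + 1 by norm_num,
        PySem.List.pyRange_one_cons (by omega), PySem.List.pyRange_one_eq_nil (by omega)]
    simp [pvPosB_zero, pvCenter_eq s h]
  · rw [not_lt] at hr
    rw [show max r 0 = r by omega, pvRangeA r hr]
    have h2 := pvMain s h r.toNat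
    rw [show ((r.toNat : Nat) : Int) = r by omega] at h2
    exact congrArg String.ofList (congrArg Prod.fst h2)
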